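-- pv_equiv track=rewrite | github.com/raymondcwh/dumb-solver | src/term.py | GetPositionsList
-- ===== SOURCE A (Python) =====
-- def GetPositionsList(n):
--     assert n > 1
--     positions = ["SB", "BB", "UTG", "UTG+1",
--         "UTG+2", "UTG+3", "LJ", "HJ", "CO", "BTN"]
--     while n < len(positions):
--         if len(positions) > 7:
--             positions.pop(-5)
--         elif len(positions) > 3:
--             positions.pop(2)
--         else:
--             positions.pop(0)
--     return positions
-- ===== SOURCE B (Python) =====
-- def GetPositionsList(n):
--     assert n > 1
--     positions = ["SB", "BB", "UTG", "UTG+1",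
--         "UTG+2", "UTG+3", "LJ", "HJ", "CO", "BTN"]
--     priority = ["UTG+3", "UTG+2", "UTG+1", "UTG", "LJ", "HJ", "CO", "SB"]
--     removed = set(priority[:max(0, 10 - n)])
--     return [p for p in positions if p not in removed]
-- ===== Notes on version B (the rewrite author's own statement) =====
-- stated objective: simpler
-- what changed: Replaces the while-loop with index-based pops by a fixed removal-priority list: take max(0,10-n) names from it into a set and filter the full 10-position list once.
import Mathlib
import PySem

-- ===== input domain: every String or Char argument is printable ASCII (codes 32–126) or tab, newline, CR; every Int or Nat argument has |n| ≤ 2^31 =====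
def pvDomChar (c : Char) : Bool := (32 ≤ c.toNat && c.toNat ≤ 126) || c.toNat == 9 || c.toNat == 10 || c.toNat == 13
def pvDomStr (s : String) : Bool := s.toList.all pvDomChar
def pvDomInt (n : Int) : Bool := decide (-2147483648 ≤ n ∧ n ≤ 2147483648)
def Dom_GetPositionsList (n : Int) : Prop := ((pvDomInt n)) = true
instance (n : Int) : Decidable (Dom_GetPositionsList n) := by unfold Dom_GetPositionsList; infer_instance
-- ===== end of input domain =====

-- B replaces A's while-loop of index-based pops by a fixed removal-priority list:
-- take max(0, 10-n) names from it into a set and filter the 10-position list once (objective: simpler).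

-- ===== PORT A =====
-- positions.pop(i): A only pops at valid indices, so the `none` fallback is never hit.
def pvPopAt (ps : List String) (i : Int) : List String :=
  match PySem.List.pop? ps i with
  | some (_, r) => r
  | none => ps

-- the while-loop; fuel (10 suffices: the list starts at length 10 and shrinks each step)
def pvLoopA : Nat → Int → List String → List String
  | 0, _, ps => ps
  | f + 1, n, ps =>
    if n < (ps.length : Int) then
      pvLoopA f n
        (if ps.length > 7 then pvPopAt ps (-5)
         else if ps.length > 3 then pvPopAt ps 2
         else pvPopAt ps 0)
    else ps

def GetPositionsList (n : Int) : List String :=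
  pvLoopA 10 n ["SB", "BB", "UTG", "UTG+1", "UTG+2", "UTG+3", "LJ", "HJ", "CO", "BTN"]

-- ===== PORT B =====
def GetPositionsList_alt (n : Int) : List String :=
  let positions := ["SB", "BB", "UTG", "UTG+1", "UTG+2", "UTG+3", "LJ", "HJ", "CO", "BTN"]
  let priority := ["UTG+3", "UTG+2", "UTG+1", "UTG", "LJ", "HJ", "CO", "SB"]
  let removed := PySem.Set.ofList (PySem.List.slice priority none (some (max 0 (10 - n))))
  positions.filter (fun p => !(PySem.Set.contains removed p))

-- ===== PRECONDITION & SPEC =====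
-- A's `assert n > 1` raises AssertionError for n ≤ 1; Pre_ excludes exactly those inputs.
def Pre_GetPositionsList (n : Int) : Prop := n > 1
instance (n : Int) : Decidable (Pre_GetPositionsList n) := by unfold Pre_GetPositionsList; infer_instance
def pvWitness_GetPositionsList : Int := (5)

def Spec_GetPositionsList (n : Int) (out : List String) : Prop := out = GetPositionsList_alt n
instance (n : Int) (out : List String) : Decidable (Spec_GetPositionsList n out) := by unfold Spec_GetPositionsList; infer_instance

-- ===== CLAIM =====
def Claim_equal_GetPositionsList : Prop := ∀ (n : Int), Dom_GetPositionsList n → Pre_GetPositionsList n → Spec_GetPositionsList n (GetPositionsList n)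

-- ===== LEMMAS AND PROOFS =====
lemma pv_big (n : Int) (h : 10 ≤ n) : GetPositionsList n = GetPositionsList_alt n := by
  have hmax : max 0 (10 - n) = 0 := by omega
  have hA : GetPositionsList n
      = ["SB", "BB", "UTG", "UTG+1", "UTG+2", "UTG+3", "LJ", "HJ", "CO", "BTN"] := by
    unfold GetPositionsList pvLoopA
    rw [if_neg (by simp; omega)]
  have hB : GetPositionsList_alt n
      = ["SB", "BB", "UTG", "UTG+1", "UTG+2", "UTG+3", "LJ", "HJ", "CO", "BTN"] := by
    unfold GetPositionsList_alt
    rw [hmax]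
    decide
  rw [hA, hB]

-- ===== VERDICT =====
theorem GetPositionsList_spec : Claim_equal_GetPositionsList := by
  intro n _ hpre
  unfold Spec_GetPositionsList
  by_cases h : n < 10
  · have h2 : 2 ≤ n := hpre
    interval_cases n <;> decide
  · exact pv_big n (by omega)
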